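-- pv_equiv track=rewrite | github.com/ShawnShawnYou/FORM-Implement | preference_util.py | is_case_3
-- ===== SOURCE A (Python) =====
-- def is_case_1(preferences):
--     ret = False
--     for i in preferences:
--         if len(i) == 0:
--             ret = True
--             break
--     return ret
--
-- def is_case_3(preferences):
--     if is_case_1(preferences):
--         return False
--     ret = False
--     for i in preferences:
--         if len(i) > 1:
--             ret = True
--             break
--     return ret
-- ===== SOURCE B (Python) =====
-- def is_case_3(preferences):
--     found = False
--     for i in preferences:
--         if len(i) == 0:
--             return False
--         elif len(i) > 1:
--             found = True
--     return found
-- ===== Notes on version B (the rewrite author's own statement) =====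
-- stated objective: simpler
-- what changed: Replaces the two sequential scans (is_case_1 emptiness scan, then a >1 scan) with one loop carrying a found-flag that returns False immediately on an empty sublist.
import Mathlib
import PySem

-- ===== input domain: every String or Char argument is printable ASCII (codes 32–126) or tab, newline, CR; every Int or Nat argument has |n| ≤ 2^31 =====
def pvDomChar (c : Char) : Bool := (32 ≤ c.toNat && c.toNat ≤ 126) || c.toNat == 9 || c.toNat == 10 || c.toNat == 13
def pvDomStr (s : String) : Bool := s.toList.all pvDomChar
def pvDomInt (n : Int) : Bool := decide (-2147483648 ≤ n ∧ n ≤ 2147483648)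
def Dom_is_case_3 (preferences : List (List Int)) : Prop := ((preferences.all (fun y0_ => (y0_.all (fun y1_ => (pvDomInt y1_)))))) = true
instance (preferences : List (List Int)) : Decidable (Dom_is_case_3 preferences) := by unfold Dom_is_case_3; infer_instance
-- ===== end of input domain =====

-- B fuses A's two sequential scans into one loop with an early False return and a found-flag (objective: simpler).


-- ===== PORT A =====
-- loop of is_case_1: scan for an empty sublist, break (= stop recursing) when found
def is_case_1 (preferences : List (List Int)) : Bool :=
  match preferences with
  | [] => false
  | i :: rest => if i.length = 0 then true else is_case_1 rest

-- second loop of is_case_3: scan for a sublist of length > 1, break when found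
def is_case_3_loop (preferences : List (List Int)) : Bool :=
  match preferences with
  | [] => false
  | i :: rest => if i.length > 1 then true else is_case_3_loop rest

def is_case_3 (preferences : List (List Int)) : Bool :=
  if is_case_1 preferences then false else is_case_3_loop preferences

-- ===== PORT B =====
-- single loop with found-flag; early return False on an empty sublist
def is_case_3_alt_loop (found : Bool) (preferences : List (List Int)) : Bool :=
  match preferences with
  | [] => found
  | i :: rest =>
    if i.length = 0 then false
    else if i.length > 1 then is_case_3_alt_loop true rest
    else is_case_3_alt_loop found rest

def is_case_3_alt (preferences : List (List Int)) : Bool :=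
  is_case_3_alt_loop false preferences

-- ===== PRECONDITION & SPEC =====
def Spec_is_case_3 (preferences : List (List Int)) (out : Bool) : Prop := out = is_case_3_alt preferences
instance (preferences : List (List Int)) (out : Bool) : Decidable (Spec_is_case_3 preferences out) := by unfold Spec_is_case_3; infer_instance

-- ===== CLAIM (what is proved, stated in full; the proofs are below) =====
def Claim_equal_is_case_3 : Prop := ∀ (preferences : List (List Int)), Dom_is_case_3 preferences → Spec_is_case_3 preferences (is_case_3 preferences)

-- ===== LEMMAS AND PROOFS =====
theorem alt_loop_char (preferences : List (List Int)) : ∀ (found : Bool),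
    is_case_3_alt_loop found preferences =
      if is_case_1 preferences then false else (found || is_case_3_loop preferences) := by
  induction preferences with
  | nil => intro found; simp [is_case_3_alt_loop, is_case_1, is_case_3_loop]
  | cons i rest ih =>
    intro found
    simp only [is_case_3_alt_loop, is_case_1, is_case_3_loop]
    by_cases h0 : i.length = 0
    · simp [h0]
    · by_cases h1 : i.length > 1
      · simp [h0, h1, ih]
      · simp [h0, h1, ih]

-- ===== VERDICT (by name: the statement is the Claim_ definition above) =====
theorem is_case_3_spec : Claim_equal_is_case_3 := by
  intro preferences _
  unfold Spec_is_case_3 is_case_3 is_case_3_alt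
  rw [alt_loop_char]
  by_cases h : is_case_1 preferences <;> simp [h]
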